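-- pv_equiv track=rewrite | github.com/Nico-Posada/doglib | src/doglib/rand.py | rand_and
-- ===== SOURCE A (Python) =====
-- def rand_and(value, mask):
--     """Format a rand() & mask observation as a bit constraint string.
--     Only bits where mask=1 are known; AND-zeroed bits reveal nothing."""
--     s = ''
--     for bit in range(30, -1, -1):
--         if mask & (1 << bit):
--             s += '1' if value & (1 << bit) else '0'
--         else:
--             s += '?'
--     return s
-- ===== SOURCE B (Python) =====
-- _TABLE = {}
-- for _m in range(16):
--     for _v in range(16):
--         _TABLE[(_m, _v)] = ''.join(
--             '?' if not _m & (1 << _b) else ('1' if _v & (1 << _b) else '0')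
--             for _b in (3, 2, 1, 0))
--
--
-- def rand_and(value, mask):
--     """Format a rand() & mask observation as a bit constraint string.
--     Table-driven: the 31 bits are processed four at a time through a
--     precomputed 256-entry nibble table, then the bit-31 column is sliced off."""
--     v = value & 0x7FFFFFFF
--     m = mask & 0x7FFFFFFF
--     s = ''.join(_TABLE[(m >> sh) & 15, (v >> sh) & 15] for sh in range(28, -1, -4))
--     return s[1:]
-- ===== Notes on version B (the rewrite author's own statement) =====
-- stated objective: alternative
-- what changed: B replaces A's 31-iteration per-bit loop with a table-driven scheme: a 256-entry dict precomputed at module load maps each (mask-nibble, value-nibble) pair to its 4-character chunk, the 0x7FFFFFFF-masked arguments are consumed four bits at a time via 8 table lookups, and the spurious bit-31 column is sliced off.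
import Mathlib
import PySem

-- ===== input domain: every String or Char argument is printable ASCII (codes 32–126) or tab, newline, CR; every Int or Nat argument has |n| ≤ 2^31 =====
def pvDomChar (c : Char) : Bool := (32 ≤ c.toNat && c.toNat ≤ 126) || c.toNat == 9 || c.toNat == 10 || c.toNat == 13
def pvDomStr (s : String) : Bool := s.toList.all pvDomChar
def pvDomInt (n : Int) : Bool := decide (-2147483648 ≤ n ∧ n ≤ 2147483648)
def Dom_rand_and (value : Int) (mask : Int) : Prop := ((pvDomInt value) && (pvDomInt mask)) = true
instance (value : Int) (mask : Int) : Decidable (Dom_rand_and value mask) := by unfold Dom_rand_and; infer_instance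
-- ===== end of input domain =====

-- B is table-driven: a precomputed 256-entry nibble table maps (mask-nibble, value-nibble) to a
-- 4-character chunk, the masked arguments are consumed four bits at a time and the bit-31 column
-- is sliced off; an alternative decomposition of the same cost.

-- ===== PORT A =====
-- 'bit' runs over range(30, -1, -1), so it is always ≥ 0 and bit.toNat is exact;
-- Python truthiness of 'mask & (1 << bit)' is '≠ 0'.
def rand_and (value : Int) (mask : Int) : String :=
  (PySem.List.pyRange 30 (-1) (-1)).foldl
    (fun s bit =>
      if PySem.Int.band mask ((1 : Int) <<< bit.toNat) ≠ 0 then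
        s ++ (if PySem.Int.band value ((1 : Int) <<< bit.toNat) ≠ 0 then "1" else "0")
      else
        s ++ "?") ""

-- ===== PORT B =====
-- the module-level table of Source B: for each nibble pair (_m, _v) in 0..15 the 4-char chunk,
-- '?' where the mask nibble's bit b is 0, else '1'/'0' from the value nibble, b = 3,2,1,0;
-- Python dict with int-pair keys → PySem.Dict (Int × Int) String.
def pvTable : PySem.Dict (Int × Int) String :=
  (List.range 16).foldl (fun d (m : Nat) =>
    (List.range 16).foldl (fun (d : PySem.Dict (Int × Int) String) (v : Nat) =>
      d.insert ((m : Int), (v : Int))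
        (String.ofList (([3, 2, 1, 0] : List Nat).map (fun b =>
          if m &&& (1 <<< b) = 0 then '?'
          else if v &&& (1 <<< b) ≠ 0 then '1' else '0')))) d)
    PySem.Dict.empty

-- v = value & 0x7FFFFFFF and m = mask & 0x7FFFFFFF are ≥ 0, so .toNat is exact and Python's
-- '>>' and '&' on them are Nat's '>>>' and '&&&'.  _TABLE[key] is ported as getD with dummy
-- default "": both nibbles are in 0..15, so the key is always present and no KeyError can occur.
def rand_and_alt (value : Int) (mask : Int) : String :=
  let v := (PySem.Int.band value 2147483647).toNat
  let m := (PySem.Int.band mask 2147483647).toNat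
  let s := (PySem.List.pyRange 28 (-1) (-4)).foldl
      (fun acc sh =>
        acc ++ pvTable.getD ((((m >>> sh.toNat) &&& 15 : Nat) : Int),
                             (((v >>> sh.toNat) &&& 15 : Nat) : Int)) "") ""
  PySem.Str.slice s (some 1) none   -- s[1:]

-- ===== PRECONDITION & SPEC =====
def Spec_rand_and (value : Int) (mask : Int) (out : String) : Prop := out = rand_and_alt value mask
instance (value : Int) (mask : Int) (out : String) : Decidable (Spec_rand_and value mask out) := by unfold Spec_rand_and; infer_instance

-- ===== CLAIM (what is proved, stated in full; the proofs are below) =====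
def Claim_equal_rand_and : Prop := ∀ (value : Int) (mask : Int), Dom_rand_and value mask → Spec_rand_and value mask (rand_and value mask)

-- ===== LEMMAS AND PROOFS =====

-- the character A appends for bit k
def chA (value mask : Int) (k : Nat) : Char :=
  if PySem.Int.band mask ((1 : Int) <<< (k : Int)) ≠ 0 then
    (if PySem.Int.band value ((1 : Int) <<< (k : Int)) ≠ 0 then '1' else '0')
  else '?'

-- the chunk the table stores for nibble pair (mn, vn), written with testBit
def nib (mn vn : Nat) : List Char :=
  [3, 2, 1, 0].map (fun b : Nat =>
    if mn.testBit b then (if vn.testBit b then '1' else '0') else '?')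

-- the character B produces for bit k of the masked arguments
def Gn (m v k : Nat) : Char :=
  if m.testBit k then (if v.testBit k then '1' else '0') else '?'

def gch (value mask : Int) (k : Nat) : Char :=
  Gn (PySem.Int.band mask 2147483647).toNat (PySem.Int.band value 2147483647).toNat k

set_option maxHeartbeats 4000000 in
set_option maxRecDepth 100000 in
lemma table_getD : ∀ mn : Nat, mn < 16 → ∀ vn : Nat, vn < 16 →
    pvTable.getD ((mn : Int), (vn : Int)) "" = String.ofList (nib mn vn) := by decide

lemma getD_nib (m v sh : Nat) :
    pvTable.getD ((((m >>> sh) &&& 15 : Nat) : Int), (((v >>> sh) &&& 15 : Nat) : Int)) ""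
      = String.ofList (nib ((m >>> sh) &&& 15) ((v >>> sh) &&& 15)) :=
  table_getD _ (lt_of_le_of_lt Nat.and_le_right (by norm_num))
             _ (lt_of_le_of_lt Nat.and_le_right (by norm_num))

lemma nib_shift (m v sh : Nat) :
    nib ((m >>> sh) &&& 15) ((v >>> sh) &&& 15)
      = [Gn m v (sh + 3), Gn m v (sh + 2), Gn m v (sh + 1), Gn m v (sh + 0)] := by
  simp [nib, Gn, Nat.testBit_and, Nat.testBit_shiftRight,
    show (15 : Nat).testBit 3 = true from rfl, show (15 : Nat).testBit 2 = true from rfl,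
    show (15 : Nat).testBit 1 = true from rfl, show (15 : Nat).testBit 0 = true from rfl]

lemma slice_one (l : List Char) :
    PySem.Str.slice (String.ofList l) (some 1) none = String.ofList l.tail := by
  rw [← String.ofList_toList (s := PySem.Str.slice (String.ofList l) (some 1) none),
    PySem.Str.toList_slice]
  simp [PySem.Chars.slice, PySem.List.slice_from_one]

lemma fold_str {α : Type} (g : String → α → String) (c : α → Char)
    (hg : ∀ s b, g s b = s ++ String.ofList [c b]) :
    ∀ (l : List α) (s : String), l.foldl g s = s ++ String.ofList (l.map c) := by
  intro l
  induction l with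
  | nil => intro s; simp
  | cons b t ih =>
      intro s
      rw [List.foldl_cons, hg, ih, String.append_assoc, ← String.ofList_append,
        List.singleton_append, List.map_cons]

lemma hpow (k : Nat) : (1 : Int) <<< (k : Int) = ((2 ^ k : Nat) : Int) := by
  rw [show (1 : Int) = ((1 : Nat) : Int) from rfl, Int.shiftLeft_natCast, Nat.shiftLeft_eq, one_mul]

-- the bit test 'n & (1 << k) != 0' as an arithmetic condition
lemma nat_bit_test (n k : Nat) : (n &&& 2 ^ k ≠ 0) ↔ n.testBit k = true := by
  rw [Nat.and_two_pow]
  cases h : n.testBit k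
  · simp
  · simp

-- bits of the low 31-bit part
lemma nat_low_bit (n k : Nat) (hk : k < 31) :
    (n &&& (2 ^ 31 - 1)) / 2 ^ k % 2 = 1 ↔ n.testBit k = true := by
  have h : (n % 2 ^ 31).testBit k = n.testBit k := by
    rw [Nat.testBit_mod_two_pow]; simp [hk]
  rw [Nat.and_two_pow_sub_one_eq_mod, ← h]
  simp [Nat.testBit_eq_decide_div_mod_eq]

-- complementing the low 31 bits flips each bit, in arithmetic form
lemma compl_bit (z k : Nat) (hz : z < 2 ^ 31) (hk : k < 31) :
    (2 ^ 31 - 1 - z) / 2 ^ k % 2 = 1 ↔ z / 2 ^ k % 2 = 0 := by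
  have hsplit : (2 : Nat) ^ 31 = 2 ^ k * 2 ^ (31 - k) := by
    rw [← pow_add]; congr 1; omega
  have hzeq : 2 ^ k * (z / 2 ^ k) + z % 2 ^ k = z := Nat.div_add_mod z (2 ^ k)
  have hr : z % 2 ^ k < 2 ^ k := Nat.mod_lt _ (Nat.two_pow_pos k)
  have hq : z / 2 ^ k < 2 ^ (31 - k) := by
    apply Nat.div_lt_of_lt_mul; omega
  have hmono : 2 ^ k * (z / 2 ^ k) + 2 ^ k ≤ 2 ^ k * 2 ^ (31 - k) := by
    have := Nat.mul_le_mul_left (2 ^ k) (Nat.succ_le_of_lt hq)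
    rwa [Nat.mul_succ] at this
  have h1 : (1 : Nat) ≤ 2 ^ k := Nat.one_le_two_pow
  have h2 : (1 : Nat) ≤ 2 ^ (31 - k) := Nat.one_le_two_pow
  have hW : 2 ^ 31 - 1 - z
      = 2 ^ k * (2 ^ (31 - k) - 1 - z / 2 ^ k) + (2 ^ k - 1 - z % 2 ^ k) := by
    rw [Nat.mul_sub, Nat.mul_sub, Nat.mul_one]
    omega
  have hdiv : (2 ^ k * (2 ^ (31 - k) - 1 - z / 2 ^ k) + (2 ^ k - 1 - z % 2 ^ k)) / 2 ^ k
      = 2 ^ (31 - k) - 1 - z / 2 ^ k := by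
    rw [Nat.mul_add_div (Nat.two_pow_pos k),
      Nat.div_eq_of_lt (show 2 ^ k - 1 - z % 2 ^ k < 2 ^ k by omega), Nat.add_zero]
  rw [hW, hdiv]
  have heven : 2 ^ (31 - k) % 2 = 0 := by
    have h31 : 31 - k = (31 - k - 1) + 1 := by omega
    rw [h31, pow_succ]
    omega
  omega

-- A's bit test equals the corresponding bit of the 0x7FFFFFFF-masked argument, for k < 31
lemma key (x : Int) (k : Nat) (hk : k < 31) :
    (PySem.Int.band x ((1 : Int) <<< (k : Int)) ≠ 0)
      ↔ (PySem.Int.band x 2147483647).toNat / 2 ^ k % 2 = 1 := by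
  have hM : (2147483647 : Int) = ((2 ^ 31 - 1 : Nat) : Int) := by norm_num
  rw [hpow, hM]
  unfold PySem.Int.band
  by_cases hx : 0 ≤ x
  · rw [if_pos hx, if_pos hx, if_pos (by positivity), if_pos (by positivity)]
    rw [Int.toNat_natCast, Int.toNat_natCast, Int.toNat_natCast]
    rw [nat_low_bit _ _ hk]
    simpa using nat_bit_test x.toNat k
  · rw [if_neg hx, if_neg hx, if_pos (by positivity), if_pos (by positivity)]
    rw [Int.toNat_natCast, Int.toNat_natCast, Int.toNat_natCast]
    set y := (-x - 1).toNat with hy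
    have hyz : y % 2 ^ 31 < 2 ^ 31 := Nat.mod_lt _ (Nat.two_pow_pos 31)
    have hland : (2 ^ 31 - 1) &&& y = y % 2 ^ 31 := by
      rw [Nat.and_comm, Nat.and_two_pow_sub_one_eq_mod]
    have hylow : (y % 2 ^ 31) / 2 ^ k % 2 = 1 ↔ y.testBit k = true := by
      rw [← Nat.and_two_pow_sub_one_eq_mod]
      exact nat_low_bit _ _ hk
    rw [hland, compl_bit _ _ hyz hk, Nat.two_pow_and]
    cases hbit : y.testBit k
    · have h0 : ¬ ((y % 2 ^ 31) / 2 ^ k % 2 = 1) := fun hc => by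
        rw [hylow] at hc; rw [hc] at hbit; exact Bool.noConfusion hbit
      simp only [Bool.toNat_false, Nat.mul_zero, Nat.sub_zero, ne_eq,
        Int.natCast_eq_zero, (Nat.two_pow_pos k).ne', not_false_eq_true, true_iff]
      omega
    · have h1 : (y % 2 ^ 31) / 2 ^ k % 2 = 1 := hylow.mpr hbit
      simp only [Bool.toNat_true, Nat.mul_one, Nat.sub_self, Int.natCast_zero, ne_eq,
        not_true_eq_false, false_iff]
      omega

-- per-position agreement of A's character with B's character
lemma charlem (value mask : Int) (k : Nat) (hk : k < 31) :
    chA value mask k = gch value mask k := by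
  have hm := key mask k hk
  have hx := key value k hk
  unfold chA gch Gn
  simp only [Nat.testBit_eq_decide_div_mod_eq]
  by_cases hm1 : (PySem.Int.band mask 2147483647).toNat / 2 ^ k % 2 = 1 <;>
    by_cases hx1 : (PySem.Int.band value 2147483647).toNat / 2 ^ k % 2 = 1 <;>
    simp [hm, hx, hm1, hx1]

lemma pyRange_lit :
    PySem.List.pyRange 30 (-1) (-1)
      = List.map (fun k : Nat => (k : Int)) ((List.range 31).reverse) := by
  decide

-- B's fold, expanded and sliced: the gch characters for bits 30..0
lemma alt_eq (value mask : Int) :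
    rand_and_alt value mask
      = String.ofList (((List.range 31).reverse).map (gch value mask)) := by
  unfold rand_and_alt
  rw [show PySem.List.pyRange 28 (-1) (-4) = [28, 24, 20, 16, 12, 8, 4, 0] from by decide]
  simp only [List.foldl_cons, List.foldl_nil,
    show ((28 : Int).toNat) = 28 from rfl, show ((24 : Int).toNat) = 24 from rfl,
    show ((20 : Int).toNat) = 20 from rfl, show ((16 : Int).toNat) = 16 from rfl,
    show ((12 : Int).toNat) = 12 from rfl, show ((8 : Int).toNat) = 8 from rfl,
    show ((4 : Int).toNat) = 4 from rfl, show ((0 : Int).toNat) = 0 from rfl,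
    getD_nib, nib_shift]
  norm_num
  simp only [← String.ofList_append, List.cons_append, List.nil_append, slice_one,
    List.tail_cons, ← List.map_reverse]
  rw [show (List.range 31).reverse
      = [30, 29, 28, 27, 26, 25, 24, 23, 22, 21, 20, 19, 18, 17, 16, 15, 14, 13, 12, 11,
         10, 9, 8, 7, 6, 5, 4, 3, 2, 1, 0] from by decide]
  simp only [List.map_cons, List.map_nil]
  rfl

-- ===== VERDICT (by name: the statement is the Claim_ definition above) =====
theorem rand_and_spec : Claim_equal_rand_and := by
  intro value mask _
  unfold Spec_rand_and rand_and
  rw [fold_str _ (fun bit => chA value mask bit.toNat) (by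
        intro s b
        simp only [chA]
        split_ifs <;> rfl)]
  rw [pyRange_lit, alt_eq]
  simp only [List.map_map]
  have hempty : ∀ t : String, "" ++ t = t := fun t => by simp
  rw [hempty]
  refine congrArg String.ofList (List.map_congr_left ?_)
  intro k hkmem
  have hk : k < 31 := List.mem_range.mp (List.mem_reverse.mp hkmem)
  simp only [Function.comp_apply]
  show chA value mask ((k : Int)).toNat = gch value mask k
  rw [Int.toNat_natCast]
  exact charlem value mask k hk
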